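-- pv_equiv track=rewrite | github.com/KrinkovD/agazati | osztztat/osztzat.py | legnagyobbElteres
-- ===== SOURCE A (Python) =====
-- def legnagyobbElteres(dolgozat, atlag):
-- 	legnagyobbElteres = 0
-- 	for pontszam in dolgozat:
-- 		aktualisElteres = abs(atlag - pontszam)
-- 		if aktualisElteres > legnagyobbElteres:
-- 			legnagyobbElteres = aktualisElteres
-- 	legnagyobbElterok = []
-- 	for pontszam in dolgozat:
-- 		aktualisElteres = abs(atlag - pontszam)
-- 		if aktualisElteres == legnagyobbElteres:
-- 			legnagyobbElterok.append(pontszam)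
--
-- 	return legnagyobbElterok
-- ===== SOURCE B (Python) =====
-- def legnagyobbElteres(dolgozat, atlag):
--     max_dev = 0
--     result = []
--     for pontszam in dolgozat:
--         dev = abs(atlag - pontszam)
--         if dev > max_dev:
--             max_dev = dev
--             result = [pontszam]
--         elif dev == max_dev:
--             result.append(pontszam)
--     return result
-- ===== Notes on version B (the rewrite author's own statement) =====
-- stated objective: alternative
-- what changed: Single pass maintaining (max deviation, current result list) with reset-on-new-max, instead of A's two separate passes (max pass then filter pass).
import Mathlib
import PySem

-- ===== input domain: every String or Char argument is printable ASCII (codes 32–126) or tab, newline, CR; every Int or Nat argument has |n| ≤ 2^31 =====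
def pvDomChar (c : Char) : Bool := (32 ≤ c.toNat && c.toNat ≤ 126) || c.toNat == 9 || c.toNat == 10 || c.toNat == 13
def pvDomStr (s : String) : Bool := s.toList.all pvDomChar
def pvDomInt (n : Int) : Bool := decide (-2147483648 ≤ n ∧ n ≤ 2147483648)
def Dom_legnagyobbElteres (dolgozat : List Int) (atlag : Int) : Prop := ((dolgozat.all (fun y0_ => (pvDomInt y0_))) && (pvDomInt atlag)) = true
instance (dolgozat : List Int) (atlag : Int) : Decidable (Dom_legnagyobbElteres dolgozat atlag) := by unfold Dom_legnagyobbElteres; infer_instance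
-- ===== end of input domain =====

-- B does the same job in ONE pass (running max with reset of the collected list) instead of A's
-- two passes (max pass, then filter pass); same return value everywhere.

-- ===== PORT A =====
-- first loop: running maximum of |atlag - pontszam|, starting from 0
def legnagyobbAMax (dolgozat : List Int) (atlag : Int) : Int :=
  dolgozat.foldl (fun leg p =>
    let e := |atlag - p|
    if e > leg then e else leg) 0

def legnagyobbElteres (dolgozat : List Int) (atlag : Int) : List Int :=
  let m := legnagyobbAMax dolgozat atlag
  dolgozat.foldl (fun acc p =>
    let e := |atlag - p|
    if e = m then acc ++ [p] else acc) []

-- ===== PORT B =====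
def legnagyobbElteres_alt (dolgozat : List Int) (atlag : Int) : List Int :=
  (dolgozat.foldl (fun st p =>
    let dev := |atlag - p|
    if dev > st.1 then (dev, [p])
    else if dev = st.1 then (st.1, st.2 ++ [p])
    else st) ((0 : Int), ([] : List Int))).2

-- ===== PRECONDITION & SPEC =====
def Spec_legnagyobbElteres (dolgozat : List Int) (atlag : Int) (out : List Int) : Prop := out = legnagyobbElteres_alt dolgozat atlag
instance (dolgozat : List Int) (atlag : Int) (out : List Int) : Decidable (Spec_legnagyobbElteres dolgozat atlag out) := by unfold Spec_legnagyobbElteres; infer_instance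

-- ===== CLAIM (what is proved, stated in full; the proofs are below) =====
def Claim_equal_legnagyobbElteres : Prop := ∀ (dolgozat : List Int) (atlag : Int), Dom_legnagyobbElteres dolgozat atlag → Spec_legnagyobbElteres dolgozat atlag (legnagyobbElteres dolgozat atlag)

-- ===== LEMMAS AND PROOFS =====

-- running max starting from m, as a helper for the invariant
def runMax (atlag : Int) (l : List Int) (m : Int) : Int :=
  l.foldl (fun leg p =>
    let e := |atlag - p|
    if e > leg then e else leg) m

lemma runMax_le (atlag : Int) (l : List Int) (m : Int) : m ≤ runMax atlag l m := by
  induction l generalizing m with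
  | nil => simp [runMax]
  | cons p t ih =>
    simp only [runMax, List.foldl_cons] at *
    by_cases h : |atlag - p| > m
    · simp only [if_pos h]
      exact le_trans (le_of_lt h) (ih _)
    · simp only [if_neg h]; exact ih _

-- B's fold invariant: from state (m, res), the fold ends with the running max and,
-- if the max never grew, res ++ the filtered suffix, else the filtered suffix at the new max.
lemma alt_fold_inv (atlag : Int) (l : List Int) (m : Int) (res : List Int) :
    l.foldl (fun st p =>
      let dev := |atlag - p|
      if dev > st.1 then (dev, [p])
      else if dev = st.1 then (st.1, st.2 ++ [p])
      else st) (m, res)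
    = (runMax atlag l m,
       if runMax atlag l m = m
       then res ++ l.foldl (fun acc p => if |atlag - p| = m then acc ++ [p] else acc) []
       else l.foldl (fun acc p => if |atlag - p| = runMax atlag l m then acc ++ [p] else acc) []) := by
  induction l generalizing m res with
  | nil => simp [runMax]
  | cons p t ih =>
    simp only [List.foldl_cons]
    have hfilt : ∀ (c : Int) (acc : List Int),
        t.foldl (fun acc p => if |atlag - p| = c then acc ++ [p] else acc) acc
        = acc ++ t.foldl (fun acc p => if |atlag - p| = c then acc ++ [p] else acc) [] := by
      intro c acc
      have := PySem.List.foldl_append_ite_eq_filter (l := t)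
        (p := fun x => |atlag - x| = c) (acc := acc)
      have h2 := PySem.List.foldl_append_ite_eq_filter (l := t)
        (p := fun x => |atlag - x| = c) (acc := ([] : List Int))
      simp at this h2
      rw [this, h2]
    by_cases h1 : |atlag - p| > m
    · simp only [if_pos h1]
      rw [ih]
      have hM : runMax atlag (p :: t) m = runMax atlag t (|atlag - p|) := by
        simp [runMax, if_pos h1]
      have hle : |atlag - p| ≤ runMax atlag t (|atlag - p|) := runMax_le _ _ _
      rw [hM]
      by_cases h2 : runMax atlag t (|atlag - p|) = |atlag - p|
      · rw [if_pos h2, if_neg (by omega), if_pos h2.symm]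
        simp only [List.nil_append]
        rw [hfilt (runMax atlag t |atlag - p|) [p], h2]
      · rw [if_neg h2, if_neg (by omega)]
        have hne : ¬ (|atlag - p| = runMax atlag t (|atlag - p|)) := fun h => h2 h.symm
        rw [if_neg hne]
    · simp only [if_neg h1]
      have hM : runMax atlag (p :: t) m = runMax atlag t m := by
        simp [runMax, if_neg h1]
      by_cases h2 : |atlag - p| = m
      · simp only [if_pos h2]
        rw [ih, hM]
        by_cases h3 : runMax atlag t m = m
        · rw [if_pos h3, if_pos h3]
          simp only [List.nil_append]
          rw [hfilt m [p]]
          simp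
        · rw [if_neg h3, if_neg h3]
          have hle : m ≤ runMax atlag t m := runMax_le _ _ _
          have hne : ¬ (|atlag - p| = runMax atlag t m) := by omega
          rw [if_neg hne]
      · simp only [if_neg h2]
        rw [ih, hM]
        by_cases h3 : runMax atlag t m = m
        · rw [if_pos h3, if_pos h3]
        · rw [if_neg h3, if_neg h3]
          have hle : m ≤ runMax atlag t m := runMax_le _ _ _
          have hne : ¬ (|atlag - p| = runMax atlag t m) := by omega
          rw [if_neg hne]

-- ===== VERDICT (by name: the statement is the Claim_ definition above) =====
theorem legnagyobbElteres_spec : Claim_equal_legnagyobbElteres := by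
  intro dolgozat atlag _
  unfold Spec_legnagyobbElteres legnagyobbElteres legnagyobbElteres_alt legnagyobbAMax
  rw [alt_fold_inv]
  simp only []
  by_cases h : runMax atlag dolgozat 0 = 0
  · rw [if_pos h]
    simp only [runMax] at h
    rw [h]
    simp
  · rw [if_neg h]
    rfl
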